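-- pv_equiv track=rewrite | github.com/arjunbahuguna/repoducing-shazam | compute.py | matching_function
-- ===== SOURCE A (Python) =====
-- def matching_function(query_hashes, database, threshold=5):
--     """
--     Match query hashes against database to find matching tracks.
--
--     From Wang03 paper Section 2.3: "Each hash from the sample is used to search
--     in the database for matching hashes... The problem of deciding whether a match
--     has been found reduces to detecting a significant cluster of points forming a
--     diagonal line within the scatterplot."
--
--     Args:
--         query_hashes: List of (hash_value, time_offset) tuples from query
--         database: Dict mapping hash_value -> list of (track_id, time_offset)
--         threshold: Minimum number of aligned hashes to consider a match
--
--     Returns: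
--         matches: List of (track_id, score, offset) sorted by score descending
--     """
--     from collections import defaultdict
--
--     # Collect time pairs for each track
--     # bins[track_id] = list of time differences (db_time - query_time)
--     bins = defaultdict(list)
--
--     for query_hash, query_time in query_hashes:
--         # Look up hash in database
--         if query_hash in database:
--             # For each occurrence in database
--             for track_id, db_time in database[query_hash]:
--                 # Calculate time difference
--                 # If tracks match, this should be consistent
--                 time_diff = db_time - query_time
--                 bins[track_id].append(time_diff)
--
--     # For each track, find the peak in the time difference histogram
--     matches = []
--
--     for track_id, time_diffs in bins.items():
--         if len(time_diffs) < threshold: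
--             continue
--
--         # Count occurrences of each time difference
--         time_diff_counts = defaultdict(int)
--         for td in time_diffs:
--             time_diff_counts[td] += 1
--
--         # Find peak (most common offset)
--         best_offset, score = max(time_diff_counts.items(), key=lambda x: x[1])
--
--         matches.append((track_id, score, best_offset))
--
--     # Sort by score descending
--     matches.sort(key=lambda x: x[1], reverse=True)
--
--     return matches
-- ===== SOURCE B (Python) =====
-- def matching_function(query_hashes, database, threshold=5):
--     """Dict-free rewrite: flatten all database hits into one (track, time_diff)
--     event stream; at each track's first appearance rescan the stream (filter +
--     count) to find its histogram peak. Return value identical to A."""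
--     events = []
--     for query_hash, query_time in query_hashes:
--         if query_hash in database:
--             for track_id, db_time in database[query_hash]:
--                 events.append((track_id, db_time - query_time))
--
--     matches = []
--     seen_tracks = set()
--     for track_id, _ in events:
--         if track_id in seen_tracks:
--             continue
--         seen_tracks.add(track_id)
--         time_diffs = [td for t, td in events if t == track_id]
--         if len(time_diffs) < threshold:
--             continue
--         score, best_offset = 0, 0
--         seen_offsets = set()
--         for td in time_diffs:
--             if td in seen_offsets:
--                 continue
--             seen_offsets.add(td)
--             c = time_diffs.count(td)
--             if score < c:
--                 score, best_offset = c, td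
--         matches.append((track_id, score, best_offset))
--
--     matches.sort(key=lambda x: x[1], reverse=True)
--     return matches
-- ===== Notes on version B (the rewrite author's own statement) =====
-- stated objective: alternative
-- what changed: B removes every dictionary: it flattens all database hits into one flat (track, time_diff) event stream and, at each track's first appearance in that stream, rescans it with filter and list.count to find the histogram peak, instead of A's defaultdict grouping followed by a per-track Counter; B trades A's hash-based grouping for repeated linear scans.
import Mathlib
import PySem

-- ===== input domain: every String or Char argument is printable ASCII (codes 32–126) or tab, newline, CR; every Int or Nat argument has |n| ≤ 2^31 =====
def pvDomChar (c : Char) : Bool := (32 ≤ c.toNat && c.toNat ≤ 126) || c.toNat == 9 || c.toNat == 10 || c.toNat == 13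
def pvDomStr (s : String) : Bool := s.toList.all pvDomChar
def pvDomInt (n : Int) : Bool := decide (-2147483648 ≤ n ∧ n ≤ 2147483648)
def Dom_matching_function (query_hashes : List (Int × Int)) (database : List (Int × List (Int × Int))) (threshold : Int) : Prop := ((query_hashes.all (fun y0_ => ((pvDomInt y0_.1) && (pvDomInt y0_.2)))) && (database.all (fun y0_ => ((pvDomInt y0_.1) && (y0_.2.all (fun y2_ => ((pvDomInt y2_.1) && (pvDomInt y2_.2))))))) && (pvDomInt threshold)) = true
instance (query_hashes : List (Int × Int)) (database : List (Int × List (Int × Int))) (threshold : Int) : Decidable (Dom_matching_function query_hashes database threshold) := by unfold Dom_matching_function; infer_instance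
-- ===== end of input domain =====

-- B removes A's dictionaries: it flattens the hits into one event stream and rescans it
-- (filter + count) at each track's first appearance; same return value, objective: alternative.

-- ===== PORT A =====
-- A: groups time differences per track into a defaultdict(list), then re-counts each
-- list into a histogram (defaultdict(int)), thresholds on the list length, takes the
-- first-maximal (offset, count) via max, then sorts by score descending (stable).
def matching_function (query_hashes : List (Int × Int)) (database : List (Int × List (Int × Int))) (threshold : Int) : List (Int × Int × Int) :=
  let db : PySem.Dict Int (List (Int × Int)) := PySem.Dict.ofList database
  let bins : PySem.Dict Int (List Int) :=
    query_hashes.foldl (fun b qp =>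
      match db.get? qp.1 with
      | some occs => occs.foldl (fun b op => b.modify op.1 [] (· ++ [op.2 - qp.2])) b
      | none => b) PySem.Dict.empty
  let ms : List (Int × Int × Int) :=
    bins.items.foldl (fun ms p =>
      if PySem.List.len p.2 < threshold then ms
      else
        let counts : PySem.Dict Int Int := p.2.foldl (fun d td => d.modify td 0 (· + 1)) PySem.Dict.empty
        let best := PySem.List.maxD counts.items (·.2) ((0 : Int), (0 : Int))
        ms ++ [(p.1, best.2, best.1)]) []
  PySem.List.sorted ms (fun m => m.2.1) true

-- ===== PORT B =====
-- B: flat event list, then one loop over the events with a seen-tracks set; at a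
-- track's first appearance the stream is rescanned (filter, then count per first
-- occurrence of an offset) — no dict anywhere; same stable final sort.
def matching_function_alt (query_hashes : List (Int × Int)) (database : List (Int × List (Int × Int))) (threshold : Int) : List (Int × Int × Int) :=
  let db : PySem.Dict Int (List (Int × Int)) := PySem.Dict.ofList database
  let events : List (Int × Int) :=
    query_hashes.foldl (fun ev qp =>
      if db.contains qp.1 then
        ((db.get? qp.1).getD []).foldl (fun ev op => ev ++ [(op.1, op.2 - qp.2)]) ev
      else ev) []
  let st : PySem.Set Int × List (Int × Int × Int) :=
    events.foldl (fun st e =>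
      if PySem.Set.contains st.1 e.1 then st
      else
        (st.1.add e.1,
         let tds := (events.filter (fun e' => e'.1 == e.1)).map (·.2)
         if PySem.List.len tds < threshold then st.2
         else
           let bs := tds.foldl (fun bs td =>
               if PySem.Set.contains bs.1 td then bs
               else
                 (bs.1.add td,
                  let c : Int := (PySem.List.count tds td : Int)
                  if bs.2.1 < c then (c, td) else bs.2))
             ((PySem.Set.empty : PySem.Set Int), ((0 : Int), (0 : Int)))
           st.2 ++ [(e.1, bs.2.1, bs.2.2)]))
      ((PySem.Set.empty : PySem.Set Int), ([] : List (Int × Int × Int)))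
  PySem.List.sorted st.2 (fun m => m.2.1) true

-- ===== PRECONDITION & SPEC =====
def Spec_matching_function (query_hashes : List (Int × Int)) (database : List (Int × List (Int × Int))) (threshold : Int) (out : List (Int × Int × Int)) : Prop := out = matching_function_alt query_hashes database threshold
instance (query_hashes : List (Int × Int)) (database : List (Int × List (Int × Int))) (threshold : Int) (out : List (Int × Int × Int)) : Decidable (Spec_matching_function query_hashes database threshold out) := by unfold Spec_matching_function; infer_instance

-- ===== CLAIM (what is proved, stated in full; the proofs are below) =====
def Claim_equal_matching_function : Prop := ∀ (query_hashes : List (Int × Int)) (database : List (Int × List (Int × Int))) (threshold : Int), Dom_matching_function query_hashes database threshold → Spec_matching_function query_hashes database threshold (matching_function query_hashes database threshold)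

-- ===== LEMMAS AND PROOFS =====

-- the (track_id, time_diff) event stream both phase-1 loops generate
def pvEvents (query_hashes : List (Int × Int)) (db : PySem.Dict Int (List (Int × Int))) : List (Int × Int) :=
  query_hashes.flatMap (fun qp => ((db.get? qp.1).getD []).map (fun op => (op.1, op.2 - qp.2)))

-- A's nested grouping loop is the modify-append fold over the event stream
theorem pv_binsA (qs : List (Int × Int)) (db : PySem.Dict Int (List (Int × Int))) :
    qs.foldl (fun b qp =>
      match db.get? qp.1 with
      | some occs => occs.foldl (fun b op => b.modify op.1 [] (· ++ [op.2 - qp.2])) b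
      | none => b) PySem.Dict.empty
    = (pvEvents qs db).foldl (fun b e => b.modify e.1 [] (· ++ [e.2])) PySem.Dict.empty := by
  rw [pvEvents, List.foldl_flatMap]
  apply PySem.List.foldl_congr_mem
  intro b qp _
  cases h : db.get? qp.1 <;> simp [List.foldl_map]

-- B's nested append loop builds exactly the event stream
theorem pv_eventsB (qs : List (Int × Int)) (db : PySem.Dict Int (List (Int × Int))) :
    qs.foldl (fun ev qp =>
      if db.contains qp.1 then
        ((db.get? qp.1).getD []).foldl (fun ev op => ev ++ [(op.1, op.2 - qp.2)]) ev
      else ev) []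
    = pvEvents qs db := by
  have hstep : ∀ (ev : List (Int × Int)), ∀ qp ∈ qs,
      (if db.contains qp.1 then
        ((db.get? qp.1).getD []).foldl (fun ev op => ev ++ [(op.1, op.2 - qp.2)]) ev
      else ev)
      = ev ++ ((db.get? qp.1).getD []).map (fun op => (op.1, op.2 - qp.2)) := by
    intro ev qp _
    by_cases hc : db.contains qp.1 = true
    · rw [if_pos hc, PySem.List.foldl_append_singleton_eq_map]
    · have hg : db.get? qp.1 = none := by
        rw [PySem.Dict.contains_eq_isSome_get?] at hc
        cases h : db.get? qp.1 <;> simp [h] at hc ⊢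
      rw [if_neg hc, hg]
      simp
  rw [PySem.List.foldl_congr_mem qs _ _ [] hstep,
      PySem.List.foldl_append_eq_flatMap, pvEvents, List.nil_append]

-- a seen-set's update only ever appends fresh elements
theorem pv_set_update_prefix {α : Type} [BEq α] (l : List α) :
    ∀ (s : PySem.Set α), ∃ rest, PySem.Set.update s l = s ++ rest := by
  induction l with
  | nil => intro s; exact ⟨[], by simp [PySem.Set.update]⟩
  | cons x l ih =>
      intro s
      obtain ⟨rest, hrest⟩ := ih (s.add x)
      have hstep : PySem.Set.update s (x :: l) = PySem.Set.update (s.add x) l := rfl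
      by_cases hc : PySem.Set.contains s x = true
      · have hadd : PySem.Set.add s x = s := by unfold PySem.Set.add; rw [if_pos hc]
        exact ⟨rest, by rw [hstep, hrest, hadd]⟩
      · have hadd : PySem.Set.add s x = s ++ [x] := by unfold PySem.Set.add; rw [if_neg hc]
        exact ⟨x :: rest, by rw [hstep, hrest, hadd, List.append_assoc]; rfl⟩

-- a loop that skips already-seen keys visits exactly the fresh first occurrences, in order
theorem pv_seen_fold {α β : Type} [BEq α] (g : β → α → β) (l : List α) :
    ∀ (seen : PySem.Set α) (ms : β),
    (l.foldl (fun st t => if PySem.Set.contains st.1 t then st else (st.1.add t, g st.2 t))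
        (seen, ms)).2
    = ((PySem.Set.update seen l).drop seen.length).foldl g ms := by
  induction l with
  | nil => intro seen ms; simp [PySem.Set.update]
  | cons t l ih =>
      intro seen ms
      simp only [List.foldl_cons]
      have hupd : PySem.Set.update seen (t :: l) = PySem.Set.update (seen.add t) l := rfl
      by_cases hc : PySem.Set.contains seen t = true
      · have hadd : PySem.Set.add seen t = seen := by unfold PySem.Set.add; rw [if_pos hc]
        rw [show (if PySem.Set.contains (seen, ms).1 t then (seen, ms)
              else ((seen, ms).1.add t, g (seen, ms).2 t)) = (seen, ms) from by rw [if_pos hc],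
            hupd, hadd]
        exact ih seen ms
      · rw [show (if PySem.Set.contains (seen, ms).1 t then (seen, ms)
              else ((seen, ms).1.add t, g (seen, ms).2 t)) = (seen.add t, g ms t) from by
                rw [if_neg hc]]
        rw [ih (seen.add t) (g ms t), hupd]
        have hadd : PySem.Set.add seen t = seen ++ [t] := by unfold PySem.Set.add; rw [if_neg hc]
        rw [hadd]
        obtain ⟨rest, hrest⟩ := pv_set_update_prefix l (seen ++ [t])
        rw [hrest]
        have h1 : ((seen ++ [t]) ++ rest).drop (seen ++ [t]).length = rest := List.drop_left
        have h2 : ((seen ++ [t]) ++ rest).drop seen.length = t :: rest := by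
          rw [List.append_assoc, List.drop_left' rfl]
          rfl
        rw [h1, h2, List.foldl_cons]

-- the seen-set loop started empty is the fold over the ordered distinct elements
theorem pv_seen_fold0 {α β : Type} [BEq α] (g : β → α → β) (l : List α) (ms : β) :
    (l.foldl (fun st t => if PySem.Set.contains st.1 t then st else (st.1.add t, g st.2 t))
        ((PySem.Set.empty : PySem.Set α), ms)).2
    = (PySem.Set.ofList l).foldl g ms := by
  exact (pv_seen_fold g l PySem.Set.empty ms).trans rfl

-- the step function of PySem.List.max? with key (·.2) over (key, count) pairs,
-- written with Option.rec so it is definitionally the one inside max?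
def pvMaxStep (f : Int → Int) (acc : Option (Int × Int)) (k : Int) : Option (Int × Int) :=
  @Option.rec (Int × Int) (fun _ => Option (Int × Int)) (some (k, f k))
    (fun m => if m.2 < f k then some (k, f k) else some m) acc

theorem pv_maxD_cons (f : Int → Int) (k : Int) (ks : List Int) :
    PySem.List.maxD ((k :: ks).map (fun j => (j, f j))) (·.2) ((0 : Int), (0 : Int))
    = (List.foldl (pvMaxStep f) (some (k, f k)) ks).getD ((0 : Int), (0 : Int)) := by
  simp only [PySem.List.maxD]
  rw [PySem.List.max?.eq_1, List.map_cons, List.foldl_cons, List.foldl_map]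
  congr 1
  refine congrArg₂ (fun F I => List.foldl F I ks) ?_ ?_
  · funext acc j
    cases acc <;> rfl
  · rfl

theorem pv_max_aux (f : Int → Int) (ks : List Int) :
    ∀ (m : Int × Int),
    ks.foldl (pvMaxStep f) (some m)
    = some ((ks.foldl (fun b j => if b.1 < f j then (f j, j) else b) (m.2, m.1)).2,
            (ks.foldl (fun b j => if b.1 < f j then (f j, j) else b) (m.2, m.1)).1) := by
  induction ks with
  | nil => intro m; rfl
  | cons k ks ih =>
      intro m
      simp only [List.foldl_cons]
      show List.foldl (pvMaxStep f) (if m.2 < f k then some (k, f k) else some m) ks = _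
      by_cases h : m.2 < f k
      · rw [if_pos h, ih (k, f k)]
        simp [h]
      · rw [if_neg h, ih m]
        simp [h]

-- first-maximal via max over (key, count) pairs = running strict-improvement scan
theorem pv_max_eq (ks : List Int) (f : Int → Int) (hne : ks ≠ [])
    (hpos : ∀ k ∈ ks, 1 ≤ f k) :
    PySem.List.maxD (ks.map (fun k => (k, f k))) (·.2) ((0 : Int), (0 : Int))
    = ((ks.foldl (fun b j => if b.1 < f j then (f j, j) else b) ((0 : Int), (0 : Int))).2,
       (ks.foldl (fun b j => if b.1 < f j then (f j, j) else b) ((0 : Int), (0 : Int))).1) := by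
  cases ks with
  | nil => exact absurd rfl hne
  | cons k ks =>
      have h0 : (0 : Int) < f k := lt_of_lt_of_le one_pos (hpos k (by simp))
      rw [pv_maxD_cons f k ks, pv_max_aux f ks (k, f k)]
      simp [h0]

-- per-track: A's max over the Counter's items equals B's rescans of the track's stream
theorem pv_track_body (l : List Int) (hne : l ≠ []) :
    PySem.List.maxD (PySem.Dict.counter l).items (·.2) ((0 : Int), (0 : Int))
    = ((l.foldl (fun bs td =>
          if PySem.Set.contains bs.1 td then bs
          else (bs.1.add td,
                if bs.2.1 < (PySem.List.count l td : Int) then ((PySem.List.count l td : Int), td)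
                else bs.2))
        ((PySem.Set.empty : PySem.Set Int), ((0 : Int), (0 : Int)))).2.2,
       (l.foldl (fun bs td =>
          if PySem.Set.contains bs.1 td then bs
          else (bs.1.add td,
                if bs.2.1 < (PySem.List.count l td : Int) then ((PySem.List.count l td : Int), td)
                else bs.2))
        ((PySem.Set.empty : PySem.Set Int), ((0 : Int), (0 : Int)))).2.1) := by
  have hB := pv_seen_fold0
    (g := fun b td => if b.1 < (PySem.List.count l td : Int) then ((PySem.List.count l td : Int), td) else b)
    l ((0 : Int), (0 : Int))
  rw [hB, PySem.Dict.items_counter]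
  have hfold : (PySem.Set.ofList l).foldl
      (fun b td => if b.1 < (PySem.List.count l td : Int) then ((PySem.List.count l td : Int), td) else b)
      ((0 : Int), (0 : Int))
    = (PySem.Set.ofList l).foldl
      (fun b td => if b.1 < ((List.count td l : Nat) : Int) then (((List.count td l : Nat) : Int), td) else b)
      ((0 : Int), (0 : Int)) := by
    apply PySem.List.foldl_congr_mem
    intro b k _
    rw [PySem.List.count_eq]
  rw [hfold]
  have hne' : PySem.Set.ofList l ≠ [] := by
    cases l with
    | nil => exact absurd rfl hne
    | cons x l =>
        intro h
        have hx : x ∈ PySem.Set.ofList (x :: l) := (PySem.Set.mem_ofList _ _).mpr (by simp)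
        rw [h] at hx
        simp at hx
  have hpos : ∀ k ∈ PySem.Set.ofList l, 1 ≤ ((List.count k l : Nat) : Int) := by
    intro k hk
    have hk' : k ∈ l := (PySem.Set.mem_ofList _ _).mp hk
    have := List.count_pos_iff.mpr hk'
    omega
  exact pv_max_eq (PySem.Set.ofList l) (fun k => ((List.count k l : Nat) : Int)) hne' hpos

-- the shared second phase: both ports reduce to the same fold over the fresh track ids
theorem pv_main (ev : List (Int × Int)) (th : Int) :
    ((ev.foldl (fun b e => b.modify e.1 [] (· ++ [e.2])) PySem.Dict.empty).items.foldl
      (fun ms p =>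
        if PySem.List.len p.2 < th then ms
        else ms ++ [(p.1,
          (PySem.List.maxD
            (p.2.foldl (fun d td => d.modify td 0 (· + 1)) (PySem.Dict.empty : PySem.Dict Int Int)).items
            (·.2) ((0 : Int), (0 : Int))).2,
          (PySem.List.maxD
            (p.2.foldl (fun d td => d.modify td 0 (· + 1)) (PySem.Dict.empty : PySem.Dict Int Int)).items
            (·.2) ((0 : Int), (0 : Int))).1)]) [])
    = (ev.foldl (fun st e =>
        if PySem.Set.contains st.1 e.1 then st
        else
          (st.1.add e.1,
           if PySem.List.len ((ev.filter (fun e' => e'.1 == e.1)).map (·.2)) < th then st.2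
           else
             st.2 ++ [(e.1,
               (((ev.filter (fun e' => e'.1 == e.1)).map (·.2)).foldl (fun bs td =>
                   if PySem.Set.contains bs.1 td then bs
                   else (bs.1.add td,
                         if bs.2.1 < (PySem.List.count ((ev.filter (fun e' => e'.1 == e.1)).map (·.2)) td : Int)
                         then ((PySem.List.count ((ev.filter (fun e' => e'.1 == e.1)).map (·.2)) td : Int), td)
                         else bs.2))
                 ((PySem.Set.empty : PySem.Set Int), ((0 : Int), (0 : Int)))).2.1,
               (((ev.filter (fun e' => e'.1 == e.1)).map (·.2)).foldl (fun bs td =>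
                   if PySem.Set.contains bs.1 td then bs
                   else (bs.1.add td,
                         if bs.2.1 < (PySem.List.count ((ev.filter (fun e' => e'.1 == e.1)).map (·.2)) td : Int)
                         then ((PySem.List.count ((ev.filter (fun e' => e'.1 == e.1)).map (·.2)) td : Int), td)
                         else bs.2))
                 ((PySem.Set.empty : PySem.Set Int), ((0 : Int), (0 : Int)))).2.2)]))
        ((PySem.Set.empty : PySem.Set Int), ([] : List (Int × Int × Int)))).2 := by
  -- B's outer loop depends on each event only through its track id
  have hm := List.foldl_map (f := fun e : Int × Int => e.1) (l := ev)
    (init := ((PySem.Set.empty : PySem.Set Int), ([] : List (Int × Int × Int))))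
    (g := fun (st : PySem.Set Int × List (Int × Int × Int)) t =>
      if PySem.Set.contains st.1 t then st
      else
        (st.1.add t,
         if PySem.List.len ((ev.filter (fun e' => e'.1 == t)).map (·.2)) < th then st.2
         else
           st.2 ++ [(t,
             (((ev.filter (fun e' => e'.1 == t)).map (·.2)).foldl (fun bs td =>
                 if PySem.Set.contains bs.1 td then bs
                 else (bs.1.add td,
                       if bs.2.1 < (PySem.List.count ((ev.filter (fun e' => e'.1 == t)).map (·.2)) td : Int)
                       then ((PySem.List.count ((ev.filter (fun e' => e'.1 == t)).map (·.2)) td : Int), td)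
                       else bs.2))
               ((PySem.Set.empty : PySem.Set Int), ((0 : Int), (0 : Int)))).2.1,
             (((ev.filter (fun e' => e'.1 == t)).map (·.2)).foldl (fun bs td =>
                 if PySem.Set.contains bs.1 td then bs
                 else (bs.1.add td,
                       if bs.2.1 < (PySem.List.count ((ev.filter (fun e' => e'.1 == t)).map (·.2)) td : Int)
                       then ((PySem.List.count ((ev.filter (fun e' => e'.1 == t)).map (·.2)) td : Int), td)
                       else bs.2))
               ((PySem.Set.empty : PySem.Set Int), ((0 : Int), (0 : Int)))).2.2)]))
  have hs := pv_seen_fold0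
    (g := fun (ms : List (Int × Int × Int)) t =>
         if PySem.List.len ((ev.filter (fun e' => e'.1 == t)).map (·.2)) < th then ms
         else
           ms ++ [(t,
             (((ev.filter (fun e' => e'.1 == t)).map (·.2)).foldl (fun bs td =>
                 if PySem.Set.contains bs.1 td then bs
                 else (bs.1.add td,
                       if bs.2.1 < (PySem.List.count ((ev.filter (fun e' => e'.1 == t)).map (·.2)) td : Int)
                       then ((PySem.List.count ((ev.filter (fun e' => e'.1 == t)).map (·.2)) td : Int), td)
                       else bs.2))
               ((PySem.Set.empty : PySem.Set Int), ((0 : Int), (0 : Int)))).2.1,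
             (((ev.filter (fun e' => e'.1 == t)).map (·.2)).foldl (fun bs td =>
                 if PySem.Set.contains bs.1 td then bs
                 else (bs.1.add td,
                       if bs.2.1 < (PySem.List.count ((ev.filter (fun e' => e'.1 == t)).map (·.2)) td : Int)
                       then ((PySem.List.count ((ev.filter (fun e' => e'.1 == t)).map (·.2)) td : Int), td)
                       else bs.2))
               ((PySem.Set.empty : PySem.Set Int), ((0 : Int), (0 : Int)))).2.2)])
    (ev.map (fun e => e.1)) []
  rw [← hm, hs]
  -- A's items list, expressed over the same fresh track ids
  set binsE := ev.foldl (fun b e => b.modify e.1 [] (· ++ [e.2])) PySem.Dict.empty with hbins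
  have hnodup : binsE.keys.Nodup := by
    rw [hbins]
    exact PySem.Dict.nodup_keys_foldl_modify_key ev Prod.fst [] (fun _ e => (· ++ [e.2]))
      PySem.Dict.empty (by simp [PySem.Dict.empty, PySem.Dict.keys])
  have hkeys : binsE.keys = PySem.Set.ofList (ev.map (fun e => e.1)) := by
    rw [hbins]
    exact (PySem.Dict.keys_foldl_modify_key ev Prod.fst [] (fun _ e => (· ++ [e.2]))
      PySem.Dict.empty).trans rfl
  have hget : ∀ t, binsE.getD t [] = (ev.filter (fun e' => e'.1 == t)).map (·.2) := by
    intro t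
    rw [hbins, PySem.Dict.getD_foldl_modify_append]
    simp [PySem.Dict.getD_empty]
  rw [PySem.Dict.items_eq_map_keys binsE hnodup [], hkeys, List.foldl_map]
  -- pointwise equality of the two per-track bodies on the fresh ids
  apply PySem.List.foldl_congr_mem
  intro ms t ht
  simp only
  rw [hget t]
  by_cases hth : PySem.List.len ((ev.filter (fun e' => e'.1 == t)).map (·.2)) < th
  · rw [if_pos hth, if_pos hth]
  · rw [if_neg hth, if_neg hth]
    have hne : (ev.filter (fun e' => e'.1 == t)).map (·.2) ≠ [] := by
      have htm : t ∈ ev.map (fun e => e.1) := (PySem.Set.mem_ofList _ _).mp ht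
      obtain ⟨e, he, het⟩ := List.mem_map.mp htm
      have hmem : e.2 ∈ (ev.filter (fun e' => e'.1 == t)).map (·.2) :=
        List.mem_map.mpr ⟨e, List.mem_filter.mpr ⟨he, by simp [het]⟩, rfl⟩
      intro h; rw [h] at hmem; simp at hmem
    rw [← PySem.Dict.counter_eq_foldl, pv_track_body _ hne]

-- ===== VERDICT (by name: the statement is the Claim_ definition above) =====
theorem matching_function_spec : Claim_equal_matching_function := by
  intro qs database th _
  unfold Spec_matching_function
  simp only [matching_function, matching_function_alt]
  rw [pv_binsA qs (PySem.Dict.ofList database), pv_eventsB qs (PySem.Dict.ofList database)]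
  exact congrArg (fun ms => PySem.List.sorted ms (fun m => m.2.1) true)
    (pv_main (pvEvents qs (PySem.Dict.ofList database)) th)
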